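-- pv_equiv track=rewrite | github.com/diaoyechao/simulate_score | wyg_pdf/utils/merge_ocr_res.py | concat_box
-- ===== SOURCE A (Python) =====
-- def concat_box(boxes):
--     sub_boxes = [[]]
--     is_concat = False
--     for i in range(len(boxes)):
--         if len(boxes[i]) >= 2 and len(sub_boxes[-1]) == 0:  # 首次合并
--             sub_boxes[-1].extend(boxes[i])
--         elif len(boxes[i]) >= 2 and len(sub_boxes[-1]) != 0:
--             for j in range(len(sub_boxes)):
--                 if set(sub_boxes[j]) & set(boxes[i]):  # 有交集、合并
--                     sub_boxes[j].extend(boxes[i])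
--                     is_concat = True
--                     break
--             else:  # 没有交集、不合并
--                 sub_boxes.append(boxes[i])
--     return sub_boxes, is_concat
-- ===== SOURCE B (Python) =====
-- def concat_box(boxes):
--     # Return value equals A's; unlike A, B does not mutate the caller's sublists.
--     groups = [[]]
--     first = {}          # element -> smallest group index containing it
--     started = False
--     is_concat = False
--     for box in boxes:
--         if len(box) < 2:
--             continue
--         if not started:
--             groups[0] = list(box)
--             for e in box:
--                 first.setdefault(e, 0)
--             started = True
--             continue
--         cands = [first[e] for e in box if e in first]
--         if cands:
--             j = min(cands)
--             groups[j] = groups[j] + list(box)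
--             for e in box:
--                 if first.get(e, j + 1) > j:
--                     first[e] = j
--             is_concat = True
--         else:
--             g = len(groups)
--             groups.append(list(box))
--             for e in box:
--                 first.setdefault(e, g)
--     return groups, is_concat
-- ===== Notes on version B (the rewrite author's own statement) =====
-- stated objective: faster
-- what changed: Replaced A's inner scan over all groups (rebuilding two Python sets per intersection test) by a dict mapping each element to the smallest index of a group containing it; the merge target is the minimum candidate index and the dict is updated incrementally, so each box is processed in time linear in its length.
import Mathlib
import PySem

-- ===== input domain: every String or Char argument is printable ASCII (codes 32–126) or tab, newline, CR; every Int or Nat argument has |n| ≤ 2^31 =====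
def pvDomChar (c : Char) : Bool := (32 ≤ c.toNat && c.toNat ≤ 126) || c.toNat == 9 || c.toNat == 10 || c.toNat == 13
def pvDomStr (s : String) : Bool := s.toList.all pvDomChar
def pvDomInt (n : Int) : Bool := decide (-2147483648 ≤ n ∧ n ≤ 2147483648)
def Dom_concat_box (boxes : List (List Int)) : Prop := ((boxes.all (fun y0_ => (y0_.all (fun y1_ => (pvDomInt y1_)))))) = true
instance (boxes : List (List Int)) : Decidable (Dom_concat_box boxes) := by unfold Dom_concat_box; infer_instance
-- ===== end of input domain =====

-- B replaces A's inner scan over groups (rebuilding two Python sets per comparison) by a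
-- dict element → smallest-group-index, merging into the minimum candidate index; same return
-- value (note: A mutates the caller's sublists in place via extend/aliasing, B does not —
-- the equivalence proved here is about the return value only).

-- ===== PORT A =====
-- truthiness of `set(sub_boxes[j]) & set(boxes[i])`: the two lists share an element (exact)
def pvHasInter (a b : List Int) : Bool := a.any (fun x => b.contains x)

-- `sub_boxes[-1].extend(boxes[i])`
def pvExtendLast (subs : List (List Int)) (box : List Int) : List (List Int) :=
  match subs with
  | [] => []
  | [l] => [l ++ box]
  | l :: rest => l :: pvExtendLast rest box

-- the inner `for j in range(len(sub_boxes)): … break / else` scan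
def pvMergeFirst (subs : List (List Int)) (box : List Int) : Option (List (List Int)) :=
  match subs with
  | [] => none
  | g :: gs => if pvHasInter g box then some ((g ++ box) :: gs)
               else (pvMergeFirst gs box).map (g :: ·)

def pvStepA (st : List (List Int) × Bool) (box : List Int) : List (List Int) × Bool :=
  if 2 ≤ box.length ∧ (st.1.getLastD []).length = 0 then (pvExtendLast st.1 box, st.2)
  else if 2 ≤ box.length then
    match pvMergeFirst st.1 box with
    | some subs' => (subs', true)
    | none => (st.1 ++ [box], st.2)
  else st

def concat_box (boxes : List (List Int)) : List (List Int) × Bool :=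
  boxes.foldl pvStepA ([[]], false)

-- ===== PORT B =====
-- `for e in box: first.setdefault(e, g)`
def pvSetDefaults (first : PySem.Dict Int Int) (box : List Int) (g : Int) : PySem.Dict Int Int :=
  box.foldl (fun d e => d.setdefault e g) first

-- `for e in box: if first.get(e, j + 1) > j: first[e] = j`
def pvLowerTo (first : PySem.Dict Int Int) (box : List Int) (j : Int) : PySem.Dict Int Int :=
  box.foldl (fun d e => if j < d.getD e (j + 1) then d.insert e j else d) first

-- state: (groups, first, started, is_concat); list indices j / len(groups) are always
-- in range (dict values are valid group indices), so `.toNat` / `getD` are exact here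
def pvStepB (st : List (List Int) × PySem.Dict Int Int × Bool × Bool) (box : List Int) :
    List (List Int) × PySem.Dict Int Int × Bool × Bool :=
  if box.length < 2 then st
  else if st.2.2.1 = false then
    (st.1.set 0 box, pvSetDefaults st.2.1 box 0, true, st.2.2.2)
  else
    match PySem.List.min? (box.filterMap (fun e => st.2.1.get? e)) (fun x => x) with
    | some j => (st.1.set j.toNat (st.1.getD j.toNat [] ++ box), pvLowerTo st.2.1 box j,
                 st.2.2.1, true)
    | none => (st.1 ++ [box], pvSetDefaults st.2.1 box (st.1.length : Int), st.2.2.1, st.2.2.2)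

def concat_box_alt (boxes : List (List Int)) : List (List Int) × Bool :=
  let st := boxes.foldl pvStepB ([[]], PySem.Dict.empty, false, false)
  (st.1, st.2.2.2)

-- ===== PRECONDITION & SPEC =====
def Spec_concat_box (boxes : List (List Int)) (out : List (List Int) × Bool) : Prop := out = concat_box_alt boxes
instance (boxes : List (List Int)) (out : List (List Int) × Bool) : Decidable (Spec_concat_box boxes out) := by unfold Spec_concat_box; infer_instance

-- ===== CLAIM (what is proved, stated in full; the proofs are below) =====
def Claim_equal_concat_box : Prop := ∀ (boxes : List (List Int)), Dom_concat_box boxes → Spec_concat_box boxes (concat_box boxes)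

-- ===== LEMMAS AND PROOFS =====

-- first index of a group containing e
def pvFidx (groups : List (List Int)) (e : Int) : Option Nat :=
  groups.findIdx? (fun g => g.contains e)

-- the dict maps every element to the first group index containing it (and nothing else)
def pvInv (groups : List (List Int)) (d : PySem.Dict Int Int) : Prop :=
  ∀ e : Int, d.get? e = (pvFidx groups e).map Int.ofNat

def pvGood (groups : List (List Int)) : Prop :=
  groups ≠ [] ∧ ∀ g ∈ groups, g ≠ []

def pvRel (sa : List (List Int) × Bool)
    (sb : List (List Int) × PySem.Dict Int Int × Bool × Bool) : Prop :=
  sb.1 = sa.1 ∧ sb.2.2.2 = sa.2 ∧ pvInv sa.1 sb.2.1 ∧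
  (sb.2.2.1 = false → sa.1 = [[]]) ∧ (sb.2.2.1 = true → pvGood sa.1)

theorem pvHasInter_iff (a b : List Int) : pvHasInter a b = true ↔ ∃ e, e ∈ b ∧ e ∈ a := by
  simp [pvHasInter, List.any_eq_true]; tauto

theorem pvSetDefaults_get? (box : List Int) (d : PySem.Dict Int Int) (g x : Int) :
    (pvSetDefaults d box g).get? x =
      match d.get? x with
      | some v => some v
      | none => if x ∈ box then some g else none := by
  induction box generalizing d with
  | nil => cases h : d.get? x <;> simp [pvSetDefaults, h]
  | cons e rest ih =>
    simp only [pvSetDefaults, List.foldl_cons] at *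
    rw [ih]
    by_cases hxe : x = e
    · subst hxe
      rw [PySem.Dict.get?_setdefault_self]
      cases h : d.get? x <;> simp [h]
    · rw [PySem.Dict.get?_setdefault_of_ne d g hxe]
      cases h : d.get? x <;> simp [hxe]

theorem pvLowerTo_get? (box : List Int) (d : PySem.Dict Int Int) (j x : Int) :
    (pvLowerTo d box j).get? x =
      if x ∈ box then
        some (match d.get? x with | some v => min v j | none => j)
      else d.get? x := by
  induction box generalizing d with
  | nil => simp [pvLowerTo]
  | cons e rest ih =>
    simp only [pvLowerTo, List.foldl_cons] at *
    rw [ih]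
    have hcond : d.getD e (j + 1) = (d.get? e).getD (j + 1) :=
      PySem.Dict.getD_eq_get?_getD d e (j + 1)
    by_cases hxe : x = e
    · subst hxe
      have hd' : ((if j < d.getD x (j + 1) then d.insert x j else d) : PySem.Dict Int Int).get? x
          = some (match d.get? x with | some v => min v j | none => j) := by
        cases h : d.get? x with
        | none =>
          rw [hcond, h]
          simp only [Option.getD_none]
          rw [if_pos (by omega)]
          simpa using PySem.Dict.get?_insert_self d x j
        | some v =>
          rw [hcond, h]
          simp only [Option.getD_some]
          by_cases hv : j < v
          · rw [if_pos hv]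
            rw [PySem.Dict.get?_insert_self d x j]
            simp only [Option.some.injEq]
            exact (min_eq_right hv.le).symm
          · rw [if_neg hv, h]
            simp only [Option.some.injEq]
            exact (min_eq_left (by omega)).symm
      rw [hd', if_pos (List.mem_cons_self)]
      by_cases hr : x ∈ rest
      · rw [if_pos hr]
        simp only [Option.some.injEq]
        cases d.get? x <;> simp
      · rw [if_neg hr]
    · have hget :
          ((if j < d.getD e (j + 1) then d.insert e j else d) : PySem.Dict Int Int).get? x
            = d.get? x := by
        split
        · exact PySem.Dict.get?_insert_of_ne d j hxe
        · rfl
      rw [hget]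
      simp [hxe]

theorem pvMergeFirst_eq (groups : List (List Int)) (box : List Int) :
    pvMergeFirst groups box =
      (groups.findIdx? (fun g => pvHasInter g box)).map
        (fun j => groups.set j (groups.getD j [] ++ box)) := by
  induction groups with
  | nil => rfl
  | cons g gs ih =>
    rw [pvMergeFirst, List.findIdx?_cons]
    by_cases h : pvHasInter g box
    · simp [h]
    · simp only [h, Bool.false_eq_true, ih, Option.map_map, if_false]
      cases List.findIdx? (fun g => pvHasInter g box) gs <;> simp

theorem pvFidx_set (groups : List (List Int)) (box : List Int) (j : Nat) (e : Int)
    (hj : j < groups.length) :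
    pvFidx (groups.set j (groups.getD j [] ++ box)) e =
      if e ∈ box then
        (match pvFidx groups e with | some k => some (min k j) | none => some j)
      else pvFidx groups e := by
  induction groups generalizing j with
  | nil => simp at hj
  | cons g gs ih =>
    cases j with
    | zero =>
      have hset : (g :: gs).set 0 (((g :: gs).getD 0 []) ++ box) = (g ++ box) :: gs := rfl
      rw [hset]
      by_cases hb : e ∈ box
      · rw [if_pos hb]
        have h1 : pvFidx ((g ++ box) :: gs) e = some 0 := by
          simp [pvFidx, List.findIdx?_cons, hb]
        rw [h1]
        cases hfe : pvFidx (g :: gs) e with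
        | none => rfl
        | some k => simp
      · rw [if_neg hb]
        unfold pvFidx
        rw [List.findIdx?_cons, List.findIdx?_cons]
        have hce : (g ++ box).contains e = g.contains e := by simp [hb]
        rw [hce]
    | succ j =>
      have hj' : j < gs.length := by simpa using hj
      have hset : (g :: gs).set (j + 1) (((g :: gs).getD (j + 1) []) ++ box)
          = g :: gs.set j ((gs.getD j []) ++ box) := rfl
      rw [hset]
      unfold pvFidx
      rw [List.findIdx?_cons, List.findIdx?_cons]
      by_cases hg : g.contains e = true
      · rw [hg]
        by_cases hb : e ∈ box <;> simp [hb]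
      · simp only [Bool.not_eq_true] at hg
        have ihj := ih j hj'
        unfold pvFidx at ihj
        rw [hg]
        simp only [Bool.false_eq_true, if_false]
        rw [ihj]
        by_cases hb : e ∈ box
        · rw [if_pos hb, if_pos hb]
          cases hfe : List.findIdx? (fun g : List Int => g.contains e) gs with
          | none => simp
          | some k => simp [Nat.succ_min_succ]
        · rw [if_neg hb, if_neg hb]

theorem pvFidx_append (groups : List (List Int)) (box : List Int) (e : Int) :
    pvFidx (groups ++ [box]) e =
      match pvFidx groups e with
      | some k => some k
      | none => if e ∈ box then some groups.length else none := by
  simp only [pvFidx, List.findIdx?_append]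
  cases h : List.findIdx? (fun g => g.contains e) groups with
  | some k => simp
  | none =>
    by_cases hb : e ∈ box
    · simp [List.findIdx?_cons, hb]
    · simp [List.findIdx?_cons, hb]

theorem pvFidx_some (groups : List (List Int)) (e : Int) (k : Nat)
    (h : pvFidx groups e = some k) :
    ∃ hk : k < groups.length, e ∈ groups[k] ∧ ∀ i, i < k → ∀ hi : i < groups.length, e ∉ groups[i] := by
  obtain ⟨hk, h1, h2⟩ := List.findIdx?_eq_some_iff_getElem.mp h
  refine ⟨hk, by simpa using h1, fun i hik hi => by simpa using h2 i hik⟩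

theorem pvFidx_of_mem (groups : List (List Int)) (e : Int) (i : Nat) (hi : i < groups.length)
    (h : e ∈ groups[i]) : ∃ k, k ≤ i ∧ pvFidx groups e = some k := by
  cases hf : pvFidx groups e with
  | none =>
    exfalso
    have := List.findIdx?_eq_none_iff.mp hf groups[i] (List.getElem_mem hi)
    simp [h] at this
  | some k =>
    refine ⟨k, ?_, rfl⟩
    obtain ⟨hk, h1, h2⟩ := pvFidx_some groups e k hf
    by_contra hik
    exact h2 i (by omega) hi h

-- B's `min(cands)` equals A's first intersecting group index
theorem pvMin_eq (groups : List (List Int)) (d : PySem.Dict Int Int) (box : List Int)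
    (hinv : pvInv groups d) :
    PySem.List.min? (box.filterMap (fun e => d.get? e)) (fun x => x) =
      (groups.findIdx? (fun g => pvHasInter g box)).map Int.ofNat := by
  have hc : box.filterMap (fun e => d.get? e)
      = box.filterMap (fun e => (pvFidx groups e).map Int.ofNat) := by
    apply List.filterMap_congr; intro e _; exact hinv e
  rw [hc]
  cases hf : groups.findIdx? (fun g => pvHasInter g box) with
  | none =>
    rw [Option.map_none, PySem.List.min?_eq_none_iff, List.filterMap_eq_nil_iff]
    intro e he
    cases hfe : pvFidx groups e with
    | none => rfl
    | some k =>
      exfalso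
      obtain ⟨hk, h1, -⟩ := pvFidx_some groups e k hfe
      have h2 := List.findIdx?_eq_none_iff.mp hf groups[k] (List.getElem_mem hk)
      have h3 : pvHasInter groups[k] box = true := (pvHasInter_iff _ _).mpr ⟨e, he, h1⟩
      have h2' : pvHasInter groups[k] box = false := h2
      rw [h3] at h2'
      exact absurd h2' (by decide)
  | some j =>
    obtain ⟨hj, hpj, hmin⟩ := List.findIdx?_eq_some_iff_getElem.mp hf
    have hmin' : ∀ k, k < j → ∀ hk : k < groups.length, pvHasInter groups[k] box = false := by
      intro k hkj hk
      have := hmin k hkj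
      simpa using this
    have hpj' : pvHasInter groups[j] box = true := by simpa using hpj
    obtain ⟨e0, he0b, he0g⟩ := (pvHasInter_iff _ _).mp hpj'
    have hjmem : (Int.ofNat j) ∈ box.filterMap (fun e => (pvFidx groups e).map Int.ofNat) := by
      obtain ⟨k, hkj, hfk⟩ := pvFidx_of_mem groups e0 j hj he0g
      obtain ⟨hk, h1, -⟩ := pvFidx_some groups e0 k hfk
      have hkj' : ¬ k < j := by
        intro hlt
        have := hmin' k hlt hk
        rw [(pvHasInter_iff _ _).mpr ⟨e0, he0b, h1⟩] at this
        exact absurd this (by simp)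
      have hkeq : k = j := by omega
      subst hkeq
      exact List.mem_filterMap.mpr ⟨e0, he0b, by rw [hfk]; rfl⟩
    have hlow : ∀ c ∈ box.filterMap (fun e => (pvFidx groups e).map Int.ofNat),
        (Int.ofNat j) ≤ c := by
      intro c hmem
      obtain ⟨e, heb, hfe⟩ := List.mem_filterMap.mp hmem
      cases hfek : pvFidx groups e with
      | none => rw [hfek] at hfe; simp at hfe
      | some k =>
        rw [hfek] at hfe
        simp only [Option.map_some, Option.some.injEq] at hfe
        obtain ⟨hk, h1, -⟩ := pvFidx_some groups e k hfek
        have hnk : ¬ k < j := by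
          intro hlt
          have := hmin' k hlt hk
          rw [(pvHasInter_iff _ _).mpr ⟨e, heb, h1⟩] at this
          exact absurd this (by simp)
        subst hfe
        simp only [Int.ofNat_eq_natCast]
        omega
    cases hm : PySem.List.min? (box.filterMap (fun e => (pvFidx groups e).map Int.ofNat)) (fun x => x) with
    | none =>
      rw [PySem.List.min?_eq_none_iff] at hm
      rw [hm] at hjmem
      simp at hjmem
    | some m =>
      have hmm := PySem.List.min?_mem hm
      have hmin2 := PySem.List.min?_isMin hm (Int.ofNat j) hjmem
      have hlo := hlow m hmm
      simp only [Option.map_some, Option.some.injEq]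
      omega

theorem pvStep_rel (sa : List (List Int) × Bool)
    (sb : List (List Int) × PySem.Dict Int Int × Bool × Bool) (box : List Int)
    (h : pvRel sa sb) : pvRel (pvStepA sa box) (pvStepB sb box) := by
  obtain ⟨ag, ac⟩ := sa
  obtain ⟨bg, bd, bs, bc⟩ := sb
  obtain ⟨hg, hc, hinv, hf, ht⟩ := h
  simp only at hg hc hinv hf ht
  subst hg hc
  by_cases hlen : box.length < 2
  · rw [pvStepB, if_pos hlen, pvStepA, if_neg (by omega), if_neg (by omega)]
    exact ⟨rfl, rfl, hinv, hf, ht⟩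
  · have hlen2 : 2 ≤ box.length := by omega
    have hbox : box ≠ [] := by intro h; subst h; simp at hlen2
    cases hst : bs with
    | false =>
      have hgg : bg = [[]] := hf hst
      subst hgg
      rw [pvStepB, if_neg hlen]
      rw [if_pos rfl]
      rw [pvStepA, if_pos (by exact ⟨hlen2, rfl⟩)]
      refine ⟨by simp [pvExtendLast], rfl, ?_, by simp, ?_⟩
      · intro e
        simp only [pvExtendLast]
        rw [pvSetDefaults_get?, hinv e]
        have h0 : pvFidx [[]] e = none := by simp [pvFidx, List.findIdx?_cons]
        rw [h0]
        by_cases hb : e ∈ box <;> simp [hb, pvFidx, List.findIdx?_cons]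
      · intro _
        refine ⟨by simp [pvExtendLast], ?_⟩
        simp only [pvExtendLast, List.nil_append, List.mem_singleton]
        intro g hgm
        subst hgm
        exact hbox
    | true =>
      have hgood := ht hst
      have hlast : (bg.getLastD []).length ≠ 0 := by
        obtain ⟨hne, hall⟩ := hgood
        have hmem : bg.getLastD [] ∈ bg := by
          rw [List.getLastD_eq_getLast?]
          cases h' : bg.getLast? with
          | none => exact absurd (List.getLast?_eq_none_iff.mp h') hne
          | some g => simpa using List.mem_of_getLast? h'
        have := hall _ hmem
        simpa [List.length_eq_zero_iff] using this
      rw [pvStepA, if_neg (by intro h; exact hlast h.2), if_pos hlen2]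
      rw [pvStepB, if_neg hlen, if_neg (by simp)]
      rw [pvMergeFirst_eq, pvMin_eq bg bd box hinv]
      cases hfi : bg.findIdx? (fun g => pvHasInter g box) with
      | none =>
        simp only [Option.map_none]
        refine ⟨rfl, rfl, ?_, fun h => absurd h (by simp), ?_⟩
        · intro e
          rw [pvSetDefaults_get?, hinv e, pvFidx_append]
          cases hfe : pvFidx bg e with
          | some k => simp
          | none => by_cases hb : e ∈ box <;> simp [hb]
        · intro _
          obtain ⟨hne, hall⟩ := hgood
          refine ⟨by simp, ?_⟩
          intro g hgmem
          rcases List.mem_append.mp hgmem with h' | h'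
          · exact hall g h'
          · simp only [List.mem_singleton] at h'; subst h'; exact hbox
      | some j =>
        have hj : j < bg.length := (List.findIdx?_eq_some_iff_getElem.mp hfi).1
        simp only [Option.map_some]
        have htn : (Int.ofNat j).toNat = j := Int.toNat_natCast j
        rw [htn]
        refine ⟨rfl, rfl, ?_, fun h => absurd h (by simp), ?_⟩
        · intro e
          rw [pvLowerTo_get?, hinv e, pvFidx_set bg box j e hj]
          by_cases hb : e ∈ box
          · rw [if_pos hb, if_pos hb]
            cases hfe : pvFidx bg e with
            | none => simp
            | some k =>
              simp only [Option.map_some, Option.some.injEq]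
              simp only [Int.ofNat_eq_natCast]
              exact (Nat.cast_min k j).symm
          · rw [if_neg hb, if_neg hb]
        · intro _
          obtain ⟨hne, hall⟩ := hgood
          constructor
          · intro h'
            have hl := congrArg List.length h'
            simp only [List.length_set, List.length_nil] at hl
            rw [List.length_eq_zero_iff.mp hl] at hne
            exact hne rfl
          · intro g hgmem
            rcases List.mem_or_eq_of_mem_set hgmem with h' | h'
            · exact hall g h'
            · subst h'
              intro h'
              rw [List.append_eq_nil_iff] at h'
              exact hbox h'.2

theorem pvFoldl_rel (boxes : List (List Int)) (sa : List (List Int) × Bool)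
    (sb : List (List Int) × PySem.Dict Int Int × Bool × Bool) (h : pvRel sa sb) :
    pvRel (boxes.foldl pvStepA sa) (boxes.foldl pvStepB sb) := by
  induction boxes generalizing sa sb with
  | nil => exact h
  | cons b rest ih => exact ih _ _ (pvStep_rel sa sb b h)

-- ===== VERDICT (by name: the statement is the Claim_ definition above) =====
theorem concat_box_spec : Claim_equal_concat_box := by
  intro boxes _
  unfold Spec_concat_box concat_box concat_box_alt
  have hinit : pvRel ([[]], false) ([[]], PySem.Dict.empty, false, false) := by
    refine ⟨rfl, rfl, ?_, fun _ => rfl, fun h => by simp at h⟩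
    intro e
    simp [pvFidx, List.findIdx?_cons, PySem.Dict.get?_empty]
  obtain ⟨h1, h2, -⟩ :=
    pvFoldl_rel boxes ([[]], false) ([[]], PySem.Dict.empty, false, false) hinit
  show boxes.foldl pvStepA ([[]], false)
      = ((boxes.foldl pvStepB ([[]], PySem.Dict.empty, false, false)).1,
         (boxes.foldl pvStepB ([[]], PySem.Dict.empty, false, false)).2.2.2)
  rw [h1, h2]
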